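-- pv_equiv track=rewrite | github.com/FAdy-200/School-stuff | Algo/Assignmnet_6/test.py | sec
-- ===== SOURCE A (Python) =====
-- def checkS(x, y, i):
--     if len(y) == 0:
--         return False
--     if i == len(x):
--         return True
--     if x[i] == y[0]:
--         return checkS(x, y[1:], i + 1) or checkS(x, y[1:], i)
--     return checkS(x, y[1:], i)
--
-- def sec(x, y):
--     if len(y) < len(x):
--         return 0
--     elif len(x) == 0:
--         return len(y)
--     if not checkS(x, y, 0):
--         return 0
--     if x[0] == y[0]:
--         return min(1 + sec(x, y[1:]), sec(x[1:], y))
--     return sec(x, y[1:])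
-- ===== SOURCE B (Python) =====
-- def sec(x, y):
--     # Bottom-up DP over suffix pairs (i, j): tabulates A's two recurrences
--     # (checkS and sec) in O(len(x)*len(y)) instead of branching recursion.
--     lx, ly = len(x), len(y)
--     can_row = [False] * (lx + 1)   # can_row[i] = checkS-value for (x suffix i, y suffix j+1)
--     s_row = [0] * (lx + 1)         # s_row[i]   = sec-value  for (x suffix i, y suffix j+1)
--     for j in range(ly - 1, -1, -1):
--         c = y[j]
--         rem = ly - j
--         new_can = [False] * (lx + 1)
--         new_can[lx] = True
--         for i in range(lx - 1, -1, -1):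
--             new_can[i] = (can_row[i + 1] or can_row[i]) if x[i] == c else can_row[i]
--         new_s = [0] * (lx + 1)
--         for i in range(lx, -1, -1):
--             if rem < lx - i:
--                 v = 0
--             elif i == lx:
--                 v = rem
--             elif not new_can[i]:
--                 v = 0
--             elif x[i] == c:
--                 v = min(1 + s_row[i], new_s[i + 1])
--             else:
--                 v = s_row[i]
--             new_s[i] = v
--         can_row, s_row = new_can, new_s
--     return s_row[0]
-- ===== Notes on version B (the rewrite author's own statement) =====
-- stated objective: faster
-- what changed: Replaces the exponential branching recursion (sec and checkS) by a bottom-up dynamic program that tabulates both recurrences over suffix pairs (i,j) with two rolling rows.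
import Mathlib
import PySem

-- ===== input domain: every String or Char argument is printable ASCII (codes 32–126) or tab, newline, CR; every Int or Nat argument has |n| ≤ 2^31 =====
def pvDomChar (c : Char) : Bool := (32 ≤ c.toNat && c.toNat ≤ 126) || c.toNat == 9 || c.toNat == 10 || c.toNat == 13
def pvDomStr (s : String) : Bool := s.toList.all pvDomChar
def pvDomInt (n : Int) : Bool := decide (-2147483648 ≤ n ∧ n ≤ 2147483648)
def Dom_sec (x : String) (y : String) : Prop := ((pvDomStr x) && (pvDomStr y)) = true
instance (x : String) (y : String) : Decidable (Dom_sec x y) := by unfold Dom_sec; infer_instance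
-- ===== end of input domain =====

-- B replaces A's exponential branching recursion by a bottom-up dynamic program
-- tabulating the same two recurrences over suffix pairs (objective: faster).

-- ===== PORT A =====
-- checkS(x, y, i): structural recursion on y, index i into x kept as in the Python.
def checkSL (x : List Char) (y : List Char) (i : Nat) : Bool :=
  match y with
  | [] => false
  | c :: ys =>
    if i = x.length then true
    else if x[i]? = some c then (checkSL x ys (i + 1) || checkSL x ys i)
    else checkSL x ys i

-- sec: the same branch order as the Python; y[1:] = tail, x[0]==y[0] via head?.
def secL (x : List Char) (y : List Char) : Int :=
  if y.length < x.length then 0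
  else if x.length = 0 then (y.length : Int)
  else if checkSL x y 0 = false then 0
  else if x.head? = y.head? then min (1 + secL x y.tail) (secL x.tail y)
  else secL x y.tail
termination_by x.length + y.length
decreasing_by
  all_goals cases x <;> cases y <;> simp_all

def sec (x : String) (y : String) : Int := secL x.toList y.toList

-- ===== PORT B =====
-- new_can row of Source B for one character c of y, entries built i = lx..0 in the
-- order the descending loop assigns them.
def stepCan (x : List Char) (c : Char) (row : List Bool) : List Bool :=
  match x with
  | [] => [true]
  | a :: xs =>
    (if a = c then (row.tail.headD false || row.headD false) else row.headD false)
      :: stepCan xs c row.tail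

-- new_s row of Source B for one step; rem = ly - j is the length of the current y-suffix.
def stepS (x : List Char) (rem : Nat) (c : Char) (can : List Bool) (srow : List Int) : List Int :=
  match x with
  | [] => [if (rem : Int) < 0 then 0 else (rem : Int)]
  | a :: xs =>
    let rest := stepS xs rem c can.tail srow.tail
    (if (rem : Int) < ((a :: xs).length : Int) then 0
     else if can.headD false = false then 0
     else if a = c then min (1 + srow.headD 0) (rest.headD 0)
     else srow.headD 0) :: rest

-- the j-loop of Source B: rolling rows for y-suffixes, from the empty suffix up.
def rowsB (x : List Char) : List Char → List Bool × List Int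
  | [] => (List.replicate (x.length + 1) false, List.replicate (x.length + 1) 0)
  | c :: ys =>
    let p := rowsB x ys
    let nc := stepCan x c p.1
    (nc, stepS x (ys.length + 1) c nc p.2)

def sec_alt (x : String) (y : String) : Int :=
  ((rowsB x.toList y.toList).2).headD 0

-- ===== PRECONDITION & SPEC =====
def Spec_sec (x : String) (y : String) (out : Int) : Prop := out = sec_alt x y
instance (x : String) (y : String) (out : Int) : Decidable (Spec_sec x y out) := by unfold Spec_sec; infer_instance

-- ===== CLAIM (what is proved, stated in full; the proofs are below) =====
def Claim_equal_sec : Prop := ∀ (x : String) (y : String), Dom_sec x y → Spec_sec x y (sec x y)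

-- ===== LEMMAS AND PROOFS =====

-- checkS on the suffix x.drop i, expressed structurally (proof-only helper).
def chk (x : List Char) (y : List Char) : Bool :=
  match y with
  | [] => false
  | c :: ys =>
    match x with
    | [] => true
    | a :: xs => if a = c then (chk xs ys || chk (a :: xs) ys) else chk (a :: xs) ys

theorem chk_nil (x : List Char) : chk x [] = false := rfl
theorem chk_nil_cons (c : Char) (ys : List Char) : chk [] (c :: ys) = true := rfl
theorem chk_cons_cons (a c : Char) (xs ys : List Char) :
    chk (a :: xs) (c :: ys)
      = if a = c then (chk xs ys || chk (a :: xs) ys) else chk (a :: xs) ys := rfl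
theorem checkSL_nil (x : List Char) (i : Nat) : checkSL x [] i = false := rfl
theorem checkSL_cons (x : List Char) (c : Char) (ys : List Char) (i : Nat) :
    checkSL x (c :: ys) i
      = if i = x.length then true
        else if x[i]? = some c then (checkSL x ys (i + 1) || checkSL x ys i)
        else checkSL x ys i := rfl
theorem stepCan_nil (c : Char) (row : List Bool) : stepCan [] c row = [true] := rfl
theorem stepCan_cons (a : Char) (xs : List Char) (c : Char) (row : List Bool) :
    stepCan (a :: xs) c row
      = (if a = c then (row.tail.headD false || row.headD false) else row.headD false)
          :: stepCan xs c row.tail := rfl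
theorem stepS_nil (rem : Nat) (c : Char) (can : List Bool) (srow : List Int) :
    stepS [] rem c can srow = [if (rem : Int) < 0 then 0 else (rem : Int)] := rfl
theorem stepS_cons (a : Char) (xs : List Char) (rem : Nat) (c : Char)
    (can : List Bool) (srow : List Int) :
    stepS (a :: xs) rem c can srow
      = (if (rem : Int) < ((a :: xs).length : Int) then 0
         else if can.headD false = false then 0
         else if a = c then min (1 + srow.headD 0) ((stepS xs rem c can.tail srow.tail).headD 0)
         else srow.headD 0) :: stepS xs rem c can.tail srow.tail := rfl

theorem tails_nil_char : List.tails ([] : List Char) = [[]] := rfl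

theorem checkSL_eq_chk (y : List Char) : ∀ (x : List Char) (i : Nat), i ≤ x.length →
    checkSL x y i = chk (x.drop i) y := by
  induction y with
  | nil => intro x i _; rw [checkSL_nil, chk_nil]
  | cons c ys ih =>
    intro x i hi
    by_cases h : i = x.length
    · subst h
      rw [checkSL_cons, if_pos rfl, List.drop_length, chk_nil_cons]
    · have hlt : i < x.length := lt_of_le_of_ne hi h
      have hdrop : x.drop i = x[i] :: x.drop (i + 1) := List.drop_eq_getElem_cons hlt
      rw [checkSL_cons, if_neg h, hdrop, chk_cons_cons, ← hdrop,
        List.getElem?_eq_getElem hlt]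
      by_cases hc : x[i] = c
      · rw [if_pos hc, if_pos (congrArg some hc), ih x (i + 1) hlt, ih x i hi]
      · rw [if_neg (fun hs => hc (Option.some.inj hs)), if_neg hc, ih x i hi]

theorem secL_nil (x : List Char) : secL x [] = 0 := by
  rw [secL]; cases x <;> simp

theorem tails_map_headD {β : Type} (f : List Char → β) (xs : List Char) (d : β) :
    ((xs.tails).map f).headD d = f xs := by
  cases xs <;> simp

theorem stepCan_spec (c : Char) (ys : List Char) :
    ∀ x : List Char, stepCan x c (x.tails.map (fun xs => chk xs ys))
      = x.tails.map (fun xs => chk xs (c :: ys)) := by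
  intro x
  induction x with
  | nil =>
    simp only [tails_nil_char, List.map_cons, List.map_nil, stepCan_nil, chk_nil_cons]
  | cons a xs ih =>
    rw [List.tails_cons, List.map_cons, List.map_cons, stepCan_cons, List.tail_cons]
    refine congrArg₂ List.cons ?_ ih
    rw [chk_cons_cons, List.headD_cons, tails_map_headD]

theorem stepS_spec (c : Char) (ys : List Char) :
    ∀ x : List Char,
      stepS x (ys.length + 1) c (x.tails.map (fun xs => chk xs (c :: ys)))
          (x.tails.map (fun xs => secL xs ys))
      = x.tails.map (fun xs => secL xs (c :: ys)) := by
  intro x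
  induction x with
  | nil =>
    simp only [tails_nil_char, List.map_cons, List.map_nil, stepS_nil]
    rw [secL]
    simp
    omega
  | cons a xs ih =>
    rw [List.tails_cons, List.map_cons, List.map_cons, List.map_cons, stepS_cons,
      List.tail_cons, List.tail_cons, ih]
    refine congrArg₂ List.cons ?_ rfl
    -- head entry equals secL (a :: xs) (c :: ys)
    rw [List.headD_cons, List.headD_cons, tails_map_headD]
    conv_rhs => rw [secL]
    have hlen0 : ¬ (a :: xs).length = 0 := by simp
    by_cases hl : (c :: ys).length < (a :: xs).length
    · have hl' : ((ys.length + 1 : Nat) : Int) < (((a :: xs).length : Nat) : Int) := by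
        simp only [List.length_cons] at hl ⊢; exact_mod_cast hl
      rw [if_pos hl', if_pos hl]
    · have hl' : ¬ ((ys.length + 1 : Nat) : Int) < (((a :: xs).length : Nat) : Int) := by
        simp only [List.length_cons] at hl ⊢; exact_mod_cast hl
      rw [if_neg hl', if_neg hl, if_neg hlen0]
      have hchk : checkSL (a :: xs) (c :: ys) 0 = chk (a :: xs) (c :: ys) := by
        have := checkSL_eq_chk (c :: ys) (a :: xs) 0 (Nat.zero_le _)
        simpa using this
      rw [hchk]
      by_cases hck : chk (a :: xs) (c :: ys) = false
      · rw [if_pos hck, if_pos hck]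
      · rw [if_neg hck, if_neg hck]
        by_cases hc : a = c
        · rw [if_pos hc, if_pos (by rw [List.head?_cons, List.head?_cons, hc]),
            List.tail_cons, List.tail_cons]
        · rw [if_neg hc,
            if_neg (fun hs => hc (by simpa using hs)), List.tail_cons]

theorem rowsB_spec (x : List Char) : ∀ ys : List Char,
    rowsB x ys = (x.tails.map (fun xs => chk xs ys), x.tails.map (fun xs => secL xs ys)) := by
  intro ys
  induction ys with
  | nil =>
    show (List.replicate (x.length + 1) false, List.replicate (x.length + 1) 0) = _
    have h1 : x.tails.map (fun xs => chk xs []) = List.replicate (x.length + 1) false := by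
      simp [chk_nil, List.map_const', List.length_tails]
    have h2 : x.tails.map (fun xs => secL xs []) = List.replicate (x.length + 1) (0 : Int) := by
      simp [secL_nil, List.map_const', List.length_tails]
    rw [h1, h2]
  | cons c ys ih =>
    show (stepCan x c (rowsB x ys).1,
          stepS x (ys.length + 1) c (stepCan x c (rowsB x ys).1) (rowsB x ys).2) = _
    rw [ih]
    rw [stepCan_spec c ys x]
    rw [stepS_spec c ys x]

theorem secL_eq_alt (x y : List Char) : ((rowsB x y).2).headD 0 = secL x y := by
  rw [rowsB_spec x y, tails_map_headD]

-- ===== VERDICT (by name: the statement is the Claim_ definition above) =====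
theorem sec_spec : Claim_equal_sec := by
  intro x y _
  unfold Spec_sec sec sec_alt
  exact (secL_eq_alt x.toList y.toList).symm
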